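-- pv_equiv track=rewrite | github.com/srv1n/editops-skills | skills/video-clipper/scripts/clip_director_v3_subtitles.py | _extract_title_text
-- ===== SOURCE A (Python) =====
-- from typing import Any, Dict, Iterable, List, Optional, Sequence, Tuple
--
-- def _extract_title_text(tokens: Sequence[str]) -> Optional[str]:
--     window = [t for t in tokens[:14] if t]
--     if not window:
--         return None
--
--     number_words = {
--         "one": 1,
--         "two": 2,
--         "three": 3,
--         "four": 4,
--         "five": 5,
--         "six": 6,
--         "seven": 7,
--         "eight": 8,
--         "nine": 9,
--         "ten": 10,
--         "eleven": 11,
--         "twelve": 12,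
--         "thirteen": 13,
--         "fourteen": 14,
--         "fifteen": 15,
--         "sixteen": 16,
--         "seventeen": 17,
--         "eighteen": 18,
--         "nineteen": 19,
--         "twenty": 20,
--     }
--     nouns = {"rules", "ways", "tips", "things", "reasons", "lessons", "principles", "steps", "facts", "signs"}
--
--     def parse_n(tok: str) -> Optional[int]:
--         if not tok:
--             return None
--         if tok.isdigit():
--             try:
--                 v = int(tok)
--                 if 1 <= v <= 99:
--                     return v
--             except Exception:
--                 return None
--         return number_words.get(tok)
--
--     for i, tok in enumerate(window):
--         n = parse_n(tok)
--         if n is None: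
--             continue
--         for j in range(i + 1, min(len(window), i + 5)):
--             noun = window[j]
--             if noun in nouns:
--                 return f"{n} {noun.upper()}"
--     return None
-- ===== SOURCE B (Python) =====
-- from typing import Optional, Sequence
--
-- def _extract_title_text(tokens: Sequence[str]) -> Optional[str]:
--     window = [t for t in tokens[:14] if t]
--
--     number_words = {
--         "one": 1, "two": 2, "three": 3, "four": 4, "five": 5,
--         "six": 6, "seven": 7, "eight": 8, "nine": 9, "ten": 10,
--         "eleven": 11, "twelve": 12, "thirteen": 13, "fourteen": 14,
--         "fifteen": 15, "sixteen": 16, "seventeen": 17, "eighteen": 18,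
--         "nineteen": 19, "twenty": 20,
--     }
--     nouns = {"rules", "ways", "tips", "things", "reasons", "lessons", "principles", "steps", "facts", "signs"}
--
--     def parse_n(tok: str) -> Optional[int]:
--         if not tok:
--             return None
--         if tok.isdigit():
--             try:
--                 v = int(tok)
--                 if 1 <= v <= 99:
--                     return v
--             except Exception:
--                 return None
--         return number_words.get(tok)
--
--     # Single pass: keep the numbers still within lookahead distance 4,
--     # oldest first; the first noun with a live number decides.
--     active = []  # (index, value) pairs, index increasing
--     for j, tok in enumerate(window):
--         active = [e for e in active if e[0] >= j - 4]
--         if active and tok in nouns: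
--             return f"{active[0][1]} {tok.upper()}"
--         n = parse_n(tok)
--         if n is not None:
--             active.append((j, n))
--     return None
-- ===== Notes on version B (the rewrite author's own statement) =====
-- stated objective: alternative
-- what changed: A's nested scan (for each number token, re-scan the next four tokens for a noun) is replaced by a single left-to-right pass that maintains the list of still-live numbers (those within lookahead distance 4) and returns at the first noun with a live number, pairing it with the oldest live number.
import Mathlib
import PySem

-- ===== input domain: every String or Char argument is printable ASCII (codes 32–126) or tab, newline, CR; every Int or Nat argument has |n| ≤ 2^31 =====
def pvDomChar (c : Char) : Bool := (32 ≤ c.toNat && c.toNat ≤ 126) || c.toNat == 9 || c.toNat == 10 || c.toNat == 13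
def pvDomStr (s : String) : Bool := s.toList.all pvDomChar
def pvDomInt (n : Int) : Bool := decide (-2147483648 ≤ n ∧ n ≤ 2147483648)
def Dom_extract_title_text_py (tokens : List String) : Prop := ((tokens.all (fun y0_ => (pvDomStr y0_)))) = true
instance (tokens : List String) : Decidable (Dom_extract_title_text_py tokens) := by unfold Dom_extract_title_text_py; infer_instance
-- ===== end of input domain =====

-- B replaces A's nested number-then-lookahead scan by one left-to-right pass that keeps
-- the still-live numbers (within lookahead distance 4) and fires at the first noun; same
-- return value everywhere (objective: alternative single-pass algorithm).

-- ===== PORT A =====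
-- shared constants/helper (identical source text in both Pythons)
def pvNumberWords : PySem.Dict String Int := PySem.Dict.ofList
  [("one", 1), ("two", 2), ("three", 3), ("four", 4), ("five", 5), ("six", 6),
   ("seven", 7), ("eight", 8), ("nine", 9), ("ten", 10), ("eleven", 11), ("twelve", 12),
   ("thirteen", 13), ("fourteen", 14), ("fifteen", 15), ("sixteen", 16), ("seventeen", 17),
   ("eighteen", 18), ("nineteen", 19), ("twenty", 20)]

def pvNouns : PySem.Set String := PySem.Set.ofList
  ["rules", "ways", "tips", "things", "reasons", "lessons", "principles", "steps", "facts", "signs"]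

def pvParseN (tok : String) : Option Int :=
  if tok = "" then none
  else if PySem.Str.strIsdigit tok then
    match PySem.Int.ofStr? tok with        -- int(tok); the try/except returns None on failure
    | some v => if 1 ≤ v ∧ v ≤ 99 then some v else PySem.Dict.get? pvNumberWords tok
    | none => none
  else PySem.Dict.get? pvNumberWords tok

def extract_title_text_py (tokens : List String) : Option String :=
  let window := (PySem.List.slice tokens none (some 14)).filter (fun t => t ≠ "")
  if window = [] then none
  else
    (PySem.List.enumerate window 0).findSome? (fun p =>
      match pvParseN p.2 with
      | none => none
      | some n =>
        (PySem.List.pyRange (p.1 + 1) (min (window.length : Int) (p.1 + 5)) 1).findSome?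
          (fun j =>
            match PySem.List.pyGet? window j with
            | some noun =>
                if PySem.Set.contains pvNouns noun then
                  some (PySem.Int.toStr n ++ " " ++ PySem.Str.upper noun)
                else none
            | none => none))                 -- unreachable: j is always in range

-- ===== PORT B =====
def pvAltLoop (rest : List String) (j : Nat) (active : List (Nat × Int)) : Option String :=
  match rest with
  | [] => none
  | tok :: rest' =>
    let active' := active.filter (fun e => j ≤ e.1 + 4)
    match active', PySem.Set.contains pvNouns tok with
    | (_, n) :: _, true => some (PySem.Int.toStr n ++ " " ++ PySem.Str.upper tok)
    | act, _ =>
      match pvParseN tok with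
      | some n => pvAltLoop rest' (j + 1) (act ++ [(j, n)])
      | none => pvAltLoop rest' (j + 1) act

def extract_title_text_py_alt (tokens : List String) : Option String :=
  let window := (PySem.List.slice tokens none (some 14)).filter (fun t => t ≠ "")
  pvAltLoop window 0 []

-- ===== PRECONDITION & SPEC =====
def Spec_extract_title_text_py (tokens : List String) (out : Option String) : Prop := out = extract_title_text_py_alt tokens
instance (tokens : List String) (out : Option String) : Decidable (Spec_extract_title_text_py tokens out) := by unfold Spec_extract_title_text_py; infer_instance

-- ===== CLAIM (what is proved, stated in full; the proofs are below) =====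
def Claim_equal_extract_title_text_py : Prop := ∀ (tokens : List String), Dom_extract_title_text_py tokens → Spec_extract_title_text_py tokens (extract_title_text_py tokens)

-- ===== LEMMAS AND PROOFS =====

-- spec-level views of the window and of a "hit" (number at i, noun at j, 0 < j-i ≤ 4)
def pvW (tokens : List String) : List String :=
  (PySem.List.slice tokens none (some 14)).filter (fun t => t ≠ "")

def pvNumAt (w : List String) (i : Nat) : Option Int := pvParseN (w.getD i "")

def pvNounAt (w : List String) (j : Nat) : Bool := PySem.Set.contains pvNouns (w.getD j "")

def pvFmt (n : Int) (t : String) : String := PySem.Int.toStr n ++ " " ++ PySem.Str.upper t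

def pvHit (w : List String) (i j : Nat) : Prop :=
  (pvNumAt w i).isSome = true ∧ pvNounAt w j = true ∧ j < w.length ∧ i < j ∧ j ≤ i + 4

-- generic first-some characterisations over List.range / pyRange
lemma pvFS_range_some {α : Type} {f : Nat → Option α} {n : Nat} {x : α}
    (h : (List.range n).findSome? f = some x) :
    ∃ i, i < n ∧ f i = some x ∧ ∀ k, k < i → f k = none := by
  induction n with
  | zero => simp at h
  | succ n ih =>
    rw [List.range_succ, List.findSome?_append] at h
    cases h' : (List.range n).findSome? f with
    | some y =>
      rw [h'] at h
      simp at h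
      subst h
      obtain ⟨i, hi, hfi, hpre⟩ := ih h'
      exact ⟨i, by omega, hfi, hpre⟩
    | none =>
      rw [h'] at h
      simp at h
      refine ⟨n, by omega, h, fun k hk => ?_⟩
      have := List.findSome?_eq_none_iff.mp h' k (List.mem_range.mpr hk)
      exact this

lemma pvFS_range_none {α : Type} {f : Nat → Option α} {n : Nat}
    (h : (List.range n).findSome? f = none) : ∀ i, i < n → f i = none := by
  intro i hi
  exact List.findSome?_eq_none_iff.mp h i (List.mem_range.mpr hi)

lemma pvFS_pyRange_some {α : Type} {g : Int → Option α} {a b : Int} {x : α}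
    (h : (PySem.List.pyRange a b 1).findSome? g = some x) :
    ∃ j, a ≤ j ∧ j < b ∧ g j = some x ∧ ∀ k, a ≤ k → k < j → g k = none := by
  rw [PySem.List.pyRange_one, List.findSome?_map] at h
  obtain ⟨i, hi, hfi, hpre⟩ := pvFS_range_some h
  refine ⟨a + i, by omega, by omega, hfi, fun k hk1 hk2 => ?_⟩
  have hk : k = a + ((k - a).toNat : Int) := by omega
  rw [hk]
  exact hpre (k - a).toNat (by omega)

lemma pvFS_pyRange_none {α : Type} {g : Int → Option α} {a b : Int}
    (h : (PySem.List.pyRange a b 1).findSome? g = none) :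
    ∀ j, a ≤ j → j < b → g j = none := by
  intro j hj1 hj2
  have hm : j ∈ PySem.List.pyRange a b 1 := PySem.List.mem_pyRange_one.mpr ⟨hj1, hj2⟩
  exact List.findSome?_eq_none_iff.mp h j hm

lemma pvEnumerate_eq_map (w : List String) (s : Int) :
    PySem.List.enumerate w s = (List.range w.length).map (fun (k : Nat) => (s + (k : Int), w.getD k "")) := by
  induction w generalizing s with
  | nil => simp [PySem.List.enumerate_nil]
  | cons x xs ih =>
    rw [PySem.List.enumerate_cons, ih (s + 1)]
    simp only [List.length_cons, List.range_succ_eq_map, List.map_cons, List.map_map]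
    refine List.cons_eq_cons.mpr ⟨by simp, ?_⟩
    apply List.map_congr_left
    intro k hk
    simp only [Function.comp_apply, List.getD_cons_succ, Prod.mk.injEq]
    exact ⟨by push_cast; ring, trivial⟩

-- the inner lookahead scan of port A, as a function of the index
def pvFA (w : List String) (k : Nat) : Option String :=
  match pvParseN (w.getD k "") with
  | none => none
  | some n =>
    (PySem.List.pyRange ((k : Int) + 1) (min (w.length : Int) ((k : Int) + 5)) 1).findSome?
      (fun j =>
        match PySem.List.pyGet? w j with
        | some noun =>
            if PySem.Set.contains pvNouns noun then
              some (PySem.Int.toStr n ++ " " ++ PySem.Str.upper noun)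
            else none
        | none => none)

lemma pvA_eq (tokens : List String) :
    extract_title_text_py tokens =
      (if pvW tokens = [] then none
       else (List.range (pvW tokens).length).findSome? (pvFA (pvW tokens))) := by
  simp only [extract_title_text_py, pvW]
  rw [pvEnumerate_eq_map, List.findSome?_map]
  congr 1
  apply congrFun
  apply congrArg
  funext k
  simp only [Function.comp_apply, zero_add]
  unfold pvFA
  rfl

lemma pvGet_getD {w : List String} {j : Nat} (h : j < w.length) :
    PySem.List.pyGet? w (j : Int) = some (w.getD j "") := by
  rw [PySem.List.pyGet?_natCast, List.getElem?_eq_getElem h, List.getD_eq_getElem w "" h]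

lemma pvG_at_hit {w : List String} (n : Int) {j : Nat}
    (hjlen : j < w.length) (hns : pvNounAt w j = true) :
    (match PySem.List.pyGet? w (j : Int) with
     | some noun =>
         if PySem.Set.contains pvNouns noun then
           some (PySem.Int.toStr n ++ " " ++ PySem.Str.upper noun)
         else none
     | none => none) = some (pvFmt n (w.getD j "")) := by
  rw [pvGet_getD hjlen]
  simp only [pvNounAt] at hns
  show (if pvNouns.contains (w.getD j "") = true then
      some (PySem.Int.toStr n ++ " " ++ PySem.Str.upper (w.getD j "")) else none) =
    some (pvFmt n (w.getD j ""))
  rw [if_pos hns]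
  rfl

lemma pvA_some {tokens : List String} {s : String}
    (h : extract_title_text_py tokens = some s) :
    ∃ i j n, pvHit (pvW tokens) i j ∧ pvNumAt (pvW tokens) i = some n ∧
      s = pvFmt n ((pvW tokens).getD j "") ∧
      (∀ i' j', pvHit (pvW tokens) i' j' → i ≤ i') ∧
      (∀ j', pvHit (pvW tokens) i j' → j ≤ j') := by
  rw [pvA_eq] at h
  set w := pvW tokens with hw
  by_cases hnil : w = []
  · rw [if_pos hnil] at h; exact absurd h (by simp)
  rw [if_neg hnil] at h
  obtain ⟨i, hilen, hFi, hpre⟩ := pvFS_range_some h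
  unfold pvFA at hFi
  cases hn : pvParseN (w.getD i "") with
  | none => rw [hn] at hFi; exact absurd hFi (by simp)
  | some n =>
    rw [hn] at hFi
    obtain ⟨jZ, hjZ1, hjZ2, hg, hgpre⟩ := pvFS_pyRange_some hFi
    rw [lt_min_iff] at hjZ2
    have hjZnn : 0 ≤ jZ := by omega
    have hjcast : ((jZ.toNat : Nat) : Int) = jZ := Int.toNat_of_nonneg hjZnn
    set j := jZ.toNat with hj
    have hjlen : j < w.length := by omega
    rw [← hjcast, pvGet_getD hjlen] at hg
    have hg' : (if pvNouns.contains (w.getD j "") = true then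
        some (PySem.Int.toStr n ++ " " ++ PySem.Str.upper (w.getD j "")) else none) = some s := hg
    clear hg
    by_cases hc : PySem.Set.contains pvNouns (w.getD j "") = true
    · rw [if_pos hc] at hg'
      have hs : s = pvFmt n (w.getD j "") := by
        simp only [pvFmt]; exact (Option.some_inj.mp hg').symm
      have hHit : pvHit w i j := by
        refine ⟨by simp only [pvNumAt, hn, Option.isSome_some], hc, hjlen, by omega, by omega⟩
      refine ⟨i, j, n, hHit, by simp only [pvNumAt, hn], hs, ?_, ?_⟩
      · -- i is minimal among all hits
        intro i' j' hH
        by_contra hlt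
        obtain ⟨hn', hns', hl', hij', hb'⟩ := hH
        have hFi' := hpre i' (by omega)
        unfold pvFA at hFi'
        cases hn2 : pvParseN (w.getD i' "") with
        | none => rw [pvNumAt, hn2] at hn'; simp at hn'
        | some n2 =>
          rw [hn2] at hFi'
          have := pvFS_pyRange_none hFi' (j' : Int) (by omega)
            (by rw [lt_min_iff]; constructor <;> [omega; omega])
          rw [pvG_at_hit n2 hl' hns'] at this
          simp at this
      · -- j is minimal for this i
        intro j' hH
        by_contra hlt
        obtain ⟨hn', hns', hl', hij', hb'⟩ := hH
        have := hgpre (j' : Int) (by omega) (by omega)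
        rw [pvG_at_hit n hl' hns'] at this
        simp at this
    · rw [if_neg hc] at hg'; exact absurd hg' (by simp)

lemma pvA_none {tokens : List String}
    (h : extract_title_text_py tokens = none) : ∀ i j, ¬ pvHit (pvW tokens) i j := by
  rw [pvA_eq] at h
  set w := pvW tokens with hw
  intro i j hH
  obtain ⟨hn, hns, hl, hij, hb⟩ := hH
  by_cases hnil : w = []
  · rw [hnil] at hl; simp at hl
  rw [if_neg hnil] at h
  have hFi := pvFS_range_none h i (by omega)
  unfold pvFA at hFi
  cases hn2 : pvParseN (w.getD i "") with
  | none => rw [pvNumAt, hn2] at hn; simp at hn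
  | some n2 =>
    rw [hn2] at hFi
    have := pvFS_pyRange_none hFi (j : Int) (by omega)
      (by rw [lt_min_iff]; constructor <;> [omega; omega])
    rw [pvG_at_hit n2 hl hns] at this
    simp at this

-- the live numbers (within distance d of the cursor j), B's invariant state
def pvLive (w : List String) (j d : Nat) : List (Nat × Int) :=
  (List.range j).filterMap
    (fun i => if j ≤ i + d then (pvNumAt w i).map (fun n => (i, n)) else none)

lemma pvLive_filter (w : List String) (j : Nat) :
    (pvLive w j 5).filter (fun e => decide (j ≤ e.1 + 4)) = pvLive w j 4 := by
  unfold pvLive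
  rw [List.filter_filterMap]
  apply List.filterMap_congr
  intro i hi
  by_cases h4 : j ≤ i + 4
  · rw [if_pos (by omega : j ≤ i + 5), if_pos h4]
    cases pvNumAt w i with
    | none => rfl
    | some n => simp [Option.filter, h4]
  · rw [if_neg h4]
    by_cases h5 : j ≤ i + 5
    · rw [if_pos h5]
      cases pvNumAt w i with
      | none => rfl
      | some n => simp [Option.filter, h4]
    · rw [if_neg h5]; rfl

lemma pvLive_step_some {w : List String} {j : Nat} {n : Int} (h : pvNumAt w j = some n) :
    pvLive w (j + 1) 5 = pvLive w j 4 ++ [(j, n)] := by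
  unfold pvLive
  rw [List.range_succ, List.filterMap_append]
  congr 1
  · apply List.filterMap_congr
    intro i hi
    rw [List.mem_range] at hi
    by_cases h4 : j ≤ i + 4
    · rw [if_pos (by omega : j + 1 ≤ i + 5), if_pos h4]
    · rw [if_neg (by omega : ¬ j + 1 ≤ i + 5), if_neg h4]
  · simp [h]

lemma pvLive_step_none {w : List String} {j : Nat} (h : pvNumAt w j = none) :
    pvLive w (j + 1) 5 = pvLive w j 4 := by
  unfold pvLive
  rw [List.range_succ, List.filterMap_append]
  have h2 : (List.filterMap (fun i => if j + 1 ≤ i + 5 then (pvNumAt w i).map (fun n => (i, n)) else none) [j]) = [] := by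
    simp [h]
  rw [h2, List.append_nil]
  apply List.filterMap_congr
  intro i hi
  rw [List.mem_range] at hi
  by_cases h4 : j ≤ i + 4
  · rw [if_pos (by omega : j + 1 ≤ i + 5), if_pos h4]
  · rw [if_neg (by omega : ¬ j + 1 ≤ i + 5), if_neg h4]

lemma pvLive_head {w : List String} {j d : Nat} {i0 : Nat} {n0 : Int} {t : List (Nat × Int)}
    (h : pvLive w j d = (i0, n0) :: t) :
    i0 < j ∧ j ≤ i0 + d ∧ pvNumAt w i0 = some n0 ∧
      ∀ k, k < i0 → ¬(j ≤ k + d ∧ (pvNumAt w k).isSome = true) := by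
  have hh : (pvLive w j d).head? = some (i0, n0) := by rw [h]; rfl
  unfold pvLive at hh
  rw [List.head?_filterMap] at hh
  obtain ⟨i, hi, hfi, hpre⟩ := pvFS_range_some hh
  by_cases hd : j ≤ i + d
  · rw [if_pos hd] at hfi
    cases hn : pvNumAt w i with
    | none => rw [hn] at hfi; simp at hfi
    | some n =>
      rw [hn] at hfi
      simp only [Option.map_some, Option.some_inj, Prod.mk.injEq] at hfi
      obtain ⟨hi0, hn0⟩ := hfi
      subst hi0; subst hn0
      refine ⟨hi, hd, hn, fun k hk => ?_⟩
      rintro ⟨hk1, hk2⟩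
      have := hpre k hk
      rw [if_pos hk1] at this
      cases hn2 : pvNumAt w k with
      | none => rw [hn2] at hk2; simp at hk2
      | some n2 => rw [hn2] at this; simp at this
  · rw [if_neg hd] at hfi; simp at hfi

lemma pvLive_ne_nil {w : List String} {j d i : Nat} {n : Int}
    (h1 : i < j) (h2 : j ≤ i + d) (h3 : pvNumAt w i = some n) : pvLive w j d ≠ [] := by
  unfold pvLive
  intro hnil
  have := List.filterMap_eq_nil_iff.mp hnil i (List.mem_range.mpr h1)
  rw [if_pos h2, h3] at this
  simp at this

lemma pvAltLoop_cons (tok : String) (rest : List String) (j : Nat) (active : List (Nat × Int)) :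
    pvAltLoop (tok :: rest) j active =
      match (active.filter (fun e => decide (j ≤ e.1 + 4))), PySem.Set.contains pvNouns tok with
      | (_, n) :: _, true => some (PySem.Int.toStr n ++ " " ++ PySem.Str.upper tok)
      | act, _ =>
        match pvParseN tok with
        | some n => pvAltLoop rest (j + 1) (act ++ [(j, n)])
        | none => pvAltLoop rest (j + 1) act := rfl

lemma pvB_some (w : List String) :
    ∀ (m j : Nat) (s : String), w.length - j = m →
    pvAltLoop (w.drop j) j (pvLive w j 5) = some s →
    ∃ i' j' n, j ≤ j' ∧ pvHit w i' j' ∧ pvNumAt w i' = some n ∧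
      s = pvFmt n (w.getD j' "") ∧
      (∀ i2 j2, j ≤ j2 → pvHit w i2 j2 → j' ≤ j2) ∧
      (∀ i2, pvHit w i2 j' → i' ≤ i2) := by
  intro m
  induction m with
  | zero =>
    intro j s hm hloop
    rw [List.drop_eq_nil_of_le (by omega)] at hloop
    exact absurd hloop (by simp [pvAltLoop])
  | succ m ih =>
    intro j s hm hloop
    have hj : j < w.length := by omega
    rw [List.drop_eq_getElem_cons hj, pvAltLoop_cons, pvLive_filter] at hloop
    have htokD : w.getD j "" = w[j] := List.getD_eq_getElem w "" hj
    cases hA : pvLive w j 4 with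
    | cons e t =>
      obtain ⟨i0, n0⟩ := e
      rw [hA] at hloop
      cases hc : PySem.Set.contains pvNouns w[j] with
      | true =>
        rw [hc] at hloop
        have hs : some (PySem.Int.toStr n0 ++ " " ++ PySem.Str.upper w[j]) = some s := hloop
        obtain ⟨hi0j, hb0, hnum0, hmin0⟩ := pvLive_head hA
        have hHit : pvHit w i0 j :=
          ⟨by rw [hnum0]; rfl, by rw [pvNounAt, htokD]; exact hc, hj, hi0j, hb0⟩
        refine ⟨i0, j, n0, le_refl j, hHit, hnum0, ?_, fun i2 j2 h _ => h, ?_⟩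
        · rw [pvFmt, htokD]
          exact (Option.some_inj.mp hs).symm
        · intro i2 hH2
          obtain ⟨hn2, hns2, hl2, hij2, hb2⟩ := hH2
          by_contra hlt
          exact hmin0 i2 (by omega) ⟨hb2, hn2⟩
      | false =>
        rw [hc] at hloop
        have hblock : ∀ i3, ¬ pvHit w i3 j := by
          intro i3 hH3
          have := hH3.2.1
          rw [pvNounAt, htokD, hc] at this
          simp at this
        have hrec : pvAltLoop (w.drop (j + 1)) (j + 1) (pvLive w (j + 1) 5) = some s := by
          cases hp : pvParseN w[j] with
          | some n =>
            rw [hp] at hloop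
            rw [pvLive_step_some (show pvNumAt w j = some n from by rw [pvNumAt, htokD]; exact hp), hA]
            exact hloop
          | none =>
            rw [hp] at hloop
            rw [pvLive_step_none (show pvNumAt w j = none from by rw [pvNumAt, htokD]; exact hp), hA]
            exact hloop
        obtain ⟨i', j', n', hjj', hHit', hnum', hs', hminj', hmini'⟩ := ih (j + 1) s (by omega) hrec
        refine ⟨i', j', n', by omega, hHit', hnum', hs', ?_, hmini'⟩
        intro i2 j2 hj2 hH2
        rcases Nat.eq_or_lt_of_le hj2 with hje | hjl
        · exact absurd (hje ▸ hH2) (hblock i2)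
        · exact hminj' i2 j2 (by omega) hH2
    | nil =>
      rw [hA] at hloop
      have hblock : ∀ i3, ¬ pvHit w i3 j := by
        intro i3 hH3
        obtain ⟨hn3, hns3, _, hij3, hb3⟩ := hH3
        cases hn3' : pvNumAt w i3 with
        | none => rw [hn3'] at hn3; simp at hn3
        | some n3 => exact pvLive_ne_nil hij3 hb3 hn3' hA
      have hrec : pvAltLoop (w.drop (j + 1)) (j + 1) (pvLive w (j + 1) 5) = some s := by
        cases hp : pvParseN w[j] with
        | some n =>
          rw [hp] at hloop
          rw [pvLive_step_some (show pvNumAt w j = some n from by rw [pvNumAt, htokD]; exact hp), hA]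
          exact hloop
        | none =>
          rw [hp] at hloop
          rw [pvLive_step_none (show pvNumAt w j = none from by rw [pvNumAt, htokD]; exact hp), hA]
          exact hloop
      obtain ⟨i', j', n', hjj', hHit', hnum', hs', hminj', hmini'⟩ := ih (j + 1) s (by omega) hrec
      refine ⟨i', j', n', by omega, hHit', hnum', hs', ?_, hmini'⟩
      intro i2 j2 hj2 hH2
      rcases Nat.eq_or_lt_of_le hj2 with hje | hjl
      · exact absurd (hje ▸ hH2) (hblock i2)
      · exact hminj' i2 j2 (by omega) hH2

lemma pvB_none (w : List String) :
    ∀ (m j : Nat), w.length - j = m →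
    pvAltLoop (w.drop j) j (pvLive w j 5) = none →
    ∀ i2 j2, j ≤ j2 → ¬ pvHit w i2 j2 := by
  intro m
  induction m with
  | zero =>
    intro j hm hloop i2 j2 hj2 hH
    exact absurd hH.2.2.1 (by omega)
  | succ m ih =>
    intro j hm hloop i2 j2 hj2 hH
    have hj : j < w.length := by omega
    rw [List.drop_eq_getElem_cons hj, pvAltLoop_cons, pvLive_filter] at hloop
    have htokD : w.getD j "" = w[j] := List.getD_eq_getElem w "" hj
    -- does a hit occur at position j itself?
    have hnotnow : ∀ i3, ¬ pvHit w i3 j := by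
      intro i3 hH3
      obtain ⟨hn3, hns3, _, hij3, hb3⟩ := hH3
      rw [pvNounAt, htokD] at hns3
      cases hn3' : pvNumAt w i3 with
      | none => rw [hn3'] at hn3; simp at hn3
      | some n3 =>
        have hne := pvLive_ne_nil hij3 hb3 hn3'
        cases hA : pvLive w j 4 with
        | nil => exact hne hA
        | cons e t =>
          obtain ⟨e1, e2⟩ := e
          rw [hA, hns3] at hloop
          simp at hloop
    rcases Nat.eq_or_lt_of_le hj2 with hje | hjl
    · exact hnotnow i2 (hje ▸ hH)
    -- the loop recursed: extract the recursive call and use the IH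
    have hrec : pvAltLoop (w.drop (j + 1)) (j + 1) (pvLive w (j + 1) 5) = none := by
      cases hA : pvLive w j 4 with
      | nil =>
        rw [hA] at hloop
        cases hp : pvParseN w[j] with
        | some n =>
          rw [hp] at hloop
          rw [pvLive_step_some (show pvNumAt w j = some n from by rw [pvNumAt, htokD]; exact hp), hA]
          exact hloop
        | none =>
          rw [hp] at hloop
          rw [pvLive_step_none (show pvNumAt w j = none from by rw [pvNumAt, htokD]; exact hp), hA]
          exact hloop
      | cons e t =>
        obtain ⟨e1, e2⟩ := e
        rw [hA] at hloop
        cases hc : PySem.Set.contains pvNouns w[j] with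
        | true =>
          rw [hc] at hloop
          have h2 : some (PySem.Int.toStr e2 ++ " " ++ PySem.Str.upper w[j]) = none := hloop
          simp at h2
        | false =>
          rw [hc] at hloop
          cases hp : pvParseN w[j] with
          | some n =>
            rw [hp] at hloop
            rw [pvLive_step_some (show pvNumAt w j = some n from by rw [pvNumAt, htokD]; exact hp), hA]
            exact hloop
          | none =>
            rw [hp] at hloop
            rw [pvLive_step_none (show pvNumAt w j = none from by rw [pvNumAt, htokD]; exact hp), hA]
            exact hloop
    exact ih (j + 1) (by omega) hrec i2 j2 (by omega) hH

lemma pvAlt_eq (tokens : List String) :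
    extract_title_text_py_alt tokens = pvAltLoop (pvW tokens) 0 [] := rfl

lemma pvUniq {w : List String} {i1 j1 i2 j2 : Nat}
    (h1 : pvHit w i1 j1)
    (hminj1 : ∀ j', pvHit w i1 j' → j1 ≤ j')
    (h2 : pvHit w i2 j2)
    (hmin2 : ∀ i' j', pvHit w i' j' → j2 ≤ j')
    (hmini2 : ∀ i', pvHit w i' j2 → i2 ≤ i')
    (hmin1 : ∀ i' j', pvHit w i' j' → i1 ≤ i') :
    i1 = i2 ∧ j1 = j2 := by
  have hi12 : i1 ≤ i2 := hmin1 _ _ h2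
  have hj21 : j2 ≤ j1 := hmin2 _ _ h1
  obtain ⟨hn1, -, -, hij1, hj1b⟩ := h1
  obtain ⟨-, hns2, hl2, hij2, -⟩ := h2
  have hH : pvHit w i1 j2 := ⟨hn1, hns2, hl2, by omega, by omega⟩
  have := hmini2 _ hH
  have hi : i1 = i2 := by omega
  subst hi
  have := hminj1 _ hH
  exact ⟨rfl, by omega⟩


-- ===== VERDICT (by name: the statement is the Claim_ definition above) =====
theorem extract_title_text_py_spec : Claim_equal_extract_title_text_py := by
  intro tokens _dom
  unfold Spec_extract_title_text_py
  cases hA : extract_title_text_py tokens with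
  | none =>
    cases hB : extract_title_text_py_alt tokens with
    | none => rfl
    | some s =>
      rw [pvAlt_eq] at hB
      have hB' : pvAltLoop ((pvW tokens).drop 0) 0 (pvLive (pvW tokens) 0 5) = some s := by
        rw [List.drop_zero]; exact hB
      obtain ⟨i', j', n', -, hHit', -⟩ :=
        pvB_some (pvW tokens) ((pvW tokens).length) 0 s rfl hB'
      exact absurd hHit' (pvA_none hA i' j')
  | some s =>
    cases hB : extract_title_text_py_alt tokens with
    | none =>
      rw [pvAlt_eq] at hB
      have hB' : pvAltLoop ((pvW tokens).drop 0) 0 (pvLive (pvW tokens) 0 5) = none := by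
        rw [List.drop_zero]; exact hB
      obtain ⟨i, j, n, hHit, -⟩ := pvA_some hA
      exact absurd hHit (pvB_none (pvW tokens) ((pvW tokens).length) 0 rfl hB' i j (by omega))
    | some s2 =>
      obtain ⟨i1, j1, n1, hHit1, hnum1, hs1, hmin1, hminj1⟩ := pvA_some hA
      rw [pvAlt_eq] at hB
      have hB' : pvAltLoop ((pvW tokens).drop 0) 0 (pvLive (pvW tokens) 0 5) = some s2 := by
        rw [List.drop_zero]; exact hB
      obtain ⟨i2, j2, n2, -, hHit2, hnum2, hs2, hminj2, hmini2⟩ :=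
        pvB_some (pvW tokens) ((pvW tokens).length) 0 s2 rfl hB'
      have hmin2' : ∀ i' j', pvHit (pvW tokens) i' j' → j2 ≤ j' :=
        fun i' j' h => hminj2 i' j' (by omega) h
      obtain ⟨hieq, hjeq⟩ := pvUniq hHit1 hminj1 hHit2 hmin2' hmini2 hmin1
      subst hieq
      subst hjeq
      rw [hnum1] at hnum2
      rw [hs1, hs2, Option.some_inj.mp hnum2]
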